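-- pv_equiv track=rewrite | github.com/aseghehey/coding-questions-solutions | Questions (random)/BinaryStrings.py | binaryStrings
-- ===== SOURCE A (Python) =====
-- def binaryStrings(binarystring, requests):
--     res = [0] * len(requests)
--     for i, req in enumerate(requests):
--         if req == 'count':
--             count = 0
--             for b in binarystring:
--                 if b == '1':
--                     count += 1
--             res[i] = count
--         else:
--             idx, cnt = -1, 0
--             for j, binary in enumerate(binarystring):
--                 if binary == '0':
--                     idx = j
--                     break
--                 cnt += 1
--
--             if idx != -1:
--                 newStr = ''
--                 for j in range(cnt + 1):
--                     if binarystring[j] == '1':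
--                         newStr += '0'
--                     else:
--                         newStr += '1'
--                 newStr += binarystring[idx + 1:]
--                 binarystring = newStr
--             res[i] = idx
--     return res
-- ===== SOURCE B (Python) =====
-- def binaryStrings(binarystring, requests):
--     # O(n + q): keep the string as a mutable list, the count of '1's incrementally,
--     # perform each flip as an in-place binary-counter increment (amortized O(1)),
--     # and answer flips on a saturated (no '0' left) string in O(1) via a flag.
--     bits = list(binarystring)
--     ones = sum(1 for c in bits if c == '1')
--     saturated = False
--     res = []
--     for req in requests:
--         if req == 'count':
--             res.append(ones)
--         elif saturated:
--             res.append(-1)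
--         else:
--             idx = -1
--             for j, c in enumerate(bits):
--                 if c == '0':
--                     idx = j
--                     break
--             if idx != -1:
--                 for j in range(idx):
--                     if bits[j] == '1':
--                         bits[j] = '0'
--                         ones -= 1
--                     else:
--                         bits[j] = '1'
--                         ones += 1
--                 bits[idx] = '1'
--                 ones += 1
--                 res.append(idx)
--             else:
--                 saturated = True
--                 res.append(-1)
--     return res
-- ===== Notes on version B (the rewrite author's own statement) =====
-- stated objective: faster
-- what changed: B keeps the string as a mutable list with an incrementally maintained count of '1's, answering 'count' in O(1) and doing each flip as an amortized O(1) in-place binary-counter increment, instead of A's full rescan and full string rebuild per request.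
import Mathlib
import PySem

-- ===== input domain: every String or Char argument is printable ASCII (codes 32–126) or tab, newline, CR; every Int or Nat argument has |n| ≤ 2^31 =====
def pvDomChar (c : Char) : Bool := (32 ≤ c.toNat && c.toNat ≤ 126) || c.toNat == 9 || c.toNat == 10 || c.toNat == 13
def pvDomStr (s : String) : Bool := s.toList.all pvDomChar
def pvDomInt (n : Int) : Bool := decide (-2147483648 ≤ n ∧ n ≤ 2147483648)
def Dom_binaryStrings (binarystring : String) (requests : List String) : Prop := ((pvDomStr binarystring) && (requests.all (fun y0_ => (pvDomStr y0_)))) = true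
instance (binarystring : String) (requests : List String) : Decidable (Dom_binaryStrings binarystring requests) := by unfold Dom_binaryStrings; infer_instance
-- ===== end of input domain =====

-- B answers 'count' from an incrementally maintained one-count and performs each flip as an
-- in-place binary-counter increment, instead of A's full rescan and string rebuild per request.

-- ===== PORT A =====
-- count = 0; for b in binarystring: if b == '1': count += 1
def pvA_count : List Char → Int → Int
  | [], count => count
  | b :: rest, count => pvA_count rest (if b = '1' then count + 1 else count)

-- idx, cnt = -1, 0; for j, binary in enumerate(binarystring): if binary == '0': idx = j; break; cnt += 1
def pvA_scan : List Char → Int → Int → Int × Int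
  | [], _, cnt => (-1, cnt)
  | binary :: rest, j, cnt => if binary = '0' then (j, cnt) else pvA_scan rest (j + 1) (cnt + 1)

-- newStr = ''; for j in range(cnt + 1): newStr += '0' if binarystring[j] == '1' else '1'
-- (the Python index binarystring[j] is always in range here, so pyGetD with a dummy default is exact)
def pvA_newStr (bs : List Char) (cnt : Int) : List Char :=
  (PySem.List.pyRange 0 (cnt + 1) 1).map (fun j => if PySem.List.pyGetD bs j ' ' = '1' then '0' else '1')

-- res[i] assigned in order over enumerate(requests) = list built left to right
def pvA_loop : List String → List Char → List Int
  | [], _ => []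
  | req :: rest, bs =>
    if req = "count" then pvA_count bs 0 :: pvA_loop rest bs
    else
      let p := pvA_scan bs 0 0
      if p.1 ≠ -1 then
        p.1 :: pvA_loop rest (pvA_newStr bs p.2 ++ PySem.List.slice bs (some (p.1 + 1)) none)
      else p.1 :: pvA_loop rest bs

def binaryStrings (binarystring : String) (requests : List String) : List Int :=
  pvA_loop requests binarystring.toList

-- ===== PORT B =====
-- ones = sum(1 for c in bits if c == '1')
def pvB_ones : List Char → Int
  | [] => 0
  | c :: rest => (if c = '1' then 1 else 0) + pvB_ones rest

-- idx = -1; for j, c in enumerate(bits): if c == '0': idx = j; break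
def pvB_find : List Char → Int → Int
  | [], _ => -1
  | c :: rest, j => if c = '0' then j else pvB_find rest (j + 1)

-- in-place increment: for j in range(idx): flip bits[j] adjusting ones; then bits[idx] = '1'; ones += 1.
-- Returns the updated list and the net change of ones ([]-case unreachable: idx indexes a '0').
def pvB_inc : List Char → Int → List Char × Int
  | [], _ => ([], 0)
  | c :: rest, n =>
    if n ≤ 0 then ('1' :: rest, 1)
    else
      let r := pvB_inc rest (n - 1)
      if c = '1' then ('0' :: r.1, r.2 - 1) else ('1' :: r.1, r.2 + 1)

def pvB_loop : List String → List Char → Int → Bool → List Int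
  | [], _, _, _ => []
  | req :: rest, bits, ones, saturated =>
    if req = "count" then ones :: pvB_loop rest bits ones saturated
    else if saturated then (-1) :: pvB_loop rest bits ones saturated
    else
      let idx := pvB_find bits 0
      if idx ≠ -1 then
        let r := pvB_inc bits idx
        idx :: pvB_loop rest r.1 (ones + r.2) saturated
      else (-1) :: pvB_loop rest bits ones true

def binaryStrings_alt (binarystring : String) (requests : List String) : List Int :=
  pvB_loop requests binarystring.toList (pvB_ones binarystring.toList) false

-- ===== PRECONDITION & SPEC =====
def Spec_binaryStrings (binarystring : String) (requests : List String) (out : List Int) : Prop := out = binaryStrings_alt binarystring requests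
instance (binarystring : String) (requests : List String) (out : List Int) : Decidable (Spec_binaryStrings binarystring requests out) := by unfold Spec_binaryStrings; infer_instance

-- ===== CLAIM (what is proved, stated in full; the proofs are below) =====
def Claim_equal_binaryStrings : Prop := ∀ (binarystring : String) (requests : List String), Dom_binaryStrings binarystring requests → Spec_binaryStrings binarystring requests (binaryStrings binarystring requests)

-- ===== LEMMAS AND PROOFS =====

def pvFlip (c : Char) : Char := if c = '1' then '0' else '1'

lemma pvA_count_eq (bs : List Char) : ∀ c, pvA_count bs c = c + pvB_ones bs := by
  induction bs with
  | nil => intro c; simp [pvA_count, pvB_ones]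
  | cons b rest ih =>
    intro c
    simp only [pvA_count, pvB_ones, ih]
    split_ifs <;> ring

lemma pvB_ones_append (a b : List Char) : pvB_ones (a ++ b) = pvB_ones a + pvB_ones b := by
  induction a with
  | nil => simp [pvB_ones]
  | cons c rest ih => simp [pvB_ones, ih]; ring

lemma pv_split (bs : List Char) (h : '0' ∈ bs) :
    ∃ p q, bs = p ++ '0' :: q ∧ '0' ∉ p := by
  induction bs with
  | nil => simp at h
  | cons c rest ih =>
    by_cases hc : c = '0'
    · exact ⟨[], rest, by simp [hc], by simp⟩
    · have : '0' ∈ rest := by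
        rcases List.mem_cons.mp h with h1 | h1
        · exact absurd h1.symm hc
        · exact h1
      obtain ⟨p, q, hpq, hp⟩ := ih this
      have hne : ¬ ('0' = c) := fun h => hc h.symm
      exact ⟨c :: p, q, by simp [hpq], by simp [hp, hne]⟩

lemma pvA_scan_none (bs : List Char) (h : '0' ∉ bs) :
    ∀ j cnt, pvA_scan bs j cnt = (-1, cnt + bs.length) := by
  induction bs with
  | nil => intro j cnt; simp [pvA_scan]
  | cons c rest ih =>
    intro j cnt
    have hc : ¬ c = '0' := fun hc => h (by simp [hc])
    have hr : '0' ∉ rest := fun hr => h (by simp [hr])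
    simp only [pvA_scan, hc, if_false, ih hr]
    rw [Prod.ext_iff]
    constructor <;> simp only [List.length_cons] <;> push_cast <;> try ring

lemma pvB_find_none (bs : List Char) (h : '0' ∉ bs) :
    ∀ j, pvB_find bs j = -1 := by
  induction bs with
  | nil => intro j; simp [pvB_find]
  | cons c rest ih =>
    intro j
    have hc : ¬ c = '0' := fun hc => h (by simp [hc])
    have hr : '0' ∉ rest := fun hr => h (by simp [hr])
    simp [pvB_find, hc, ih hr]

lemma pvA_scan_split (p : List Char) (hp : '0' ∉ p) :
    ∀ (q : List Char) j cnt, pvA_scan (p ++ '0' :: q) j cnt = (j + p.length, cnt + p.length) := by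
  induction p with
  | nil => intro q j cnt; simp [pvA_scan]
  | cons c rest ih =>
    intro q j cnt
    have hc : ¬ c = '0' := fun hc => hp (by simp [hc])
    have hr : '0' ∉ rest := fun hr => hp (by simp [hr])
    simp only [List.cons_append, pvA_scan, hc, if_false, ih hr]
    rw [Prod.ext_iff]
    constructor <;> simp only [List.length_cons] <;> push_cast <;> try ring

lemma pvB_find_split (p : List Char) (hp : '0' ∉ p) :
    ∀ (q : List Char) j, pvB_find (p ++ '0' :: q) j = j + p.length := by
  induction p with
  | nil => intro q j; simp [pvB_find]
  | cons c rest ih =>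
    intro q j
    have hc : ¬ c = '0' := fun hc => hp (by simp [hc])
    have hr : '0' ∉ rest := fun hr => hp (by simp [hr])
    simp only [List.cons_append, pvB_find, hc, if_false, ih hr]
    simp only [List.length_cons]
    push_cast
    omega

lemma pvB_inc_split (p : List Char) :
    ∀ (q : List Char), pvB_inc (p ++ '0' :: q) (p.length : Int) =
      (p.map pvFlip ++ '1' :: q, pvB_ones (p.map pvFlip) + 1 - pvB_ones p) := by
  induction p with
  | nil => intro q; simp [pvB_inc, pvB_ones]
  | cons c rest ih =>
    intro q
    have hlen : ¬ ((( c :: rest).length : Int) ≤ 0) := by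
      simp only [List.length_cons]; push_cast; omega
    simp only [List.cons_append, pvB_inc, hlen, if_false]
    have harg : ((List.length (c :: rest) : Int) - 1) = (rest.length : Int) := by
      simp
    rw [harg, ih q]
    by_cases hc : c = '1' <;> simp [hc, pvFlip, pvB_ones] <;> ring

lemma pvA_newStr_eq (p q : List Char) :
    pvA_newStr (p ++ '0' :: q) (p.length : Int) = p.map pvFlip ++ ['1'] := by
  unfold pvA_newStr
  have h1 : ((p.length : Int) + 1) = ((p.length + 1 : Nat) : Int) := by push_cast; ring
  rw [h1, PySem.List.pyRange_zero_natCast]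
  apply List.ext_getElem
  · simp
  · intro i h1' h2'
    simp only [List.getElem_map, List.getElem_range, PySem.List.pyGetD_natCast]
    simp only [List.length_map, List.length_range] at h1'
    rcases Nat.lt_succ_iff_lt_or_eq.mp h1' with hi | hi
    · have hps : (p ++ '0' :: q).getD i ' ' = p[i] := by
        rw [List.getD_eq_getElem?_getD, List.getElem?_append_left hi]
        simp [hi]
      rw [hps]
      have h2'' : i < (p.map pvFlip).length := by simpa using hi
      rw [List.getElem_append_left h2'']
      simp [pvFlip]
    · subst hi
      have hps : (p ++ '0' :: q).getD p.length ' ' = '0' := by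
        rw [List.getD_eq_getElem?_getD, List.getElem?_append_right (le_refl _)]
        simp
      rw [hps]
      have : (p.map pvFlip ++ ['1'])[p.length] = '1' := by
        rw [List.getElem_append_right (by simp)]
        simp
      rw [this]
      decide

lemma pv_main_sat (reqs : List String) : ∀ bs : List Char, '0' ∉ bs →
    pvA_loop reqs bs = pvB_loop reqs bs (pvB_ones bs) true := by
  induction reqs with
  | nil => intro bs _; simp [pvA_loop, pvB_loop]
  | cons req rest ih =>
    intro bs hz
    by_cases hreq : req = "count"
    · simp only [pvA_loop, pvB_loop, hreq, if_pos, ih bs hz]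
      rw [pvA_count_eq bs 0]; simp
    · simp only [pvA_loop, pvB_loop, if_neg hreq, if_pos]
      rw [pvA_scan_none bs hz 0 0]
      simp [ih bs hz]

lemma pv_main (reqs : List String) : ∀ bs : List Char,
    pvA_loop reqs bs = pvB_loop reqs bs (pvB_ones bs) false := by
  induction reqs with
  | nil => intro bs; simp [pvA_loop, pvB_loop]
  | cons req rest ih =>
    intro bs
    by_cases hreq : req = "count"
    · simp only [pvA_loop, pvB_loop, hreq, ih]
      rw [pvA_count_eq bs 0]; simp
    · simp only [pvA_loop, pvB_loop, if_neg hreq]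
      by_cases hz : '0' ∈ bs
      · obtain ⟨p, q, hpq, hp⟩ := pv_split bs hz
        subst hpq
        rw [pvA_scan_split p hp q 0 0, pvB_find_split p hp q 0]
        have h0 : (0:Int) + p.length = (p.length : Int) := by ring
        rw [h0, pvB_inc_split p q]
        have hne : ((p.length : Int)) ≠ -1 := by omega
        simp only [ne_eq, hne, not_false_eq_true, if_pos]
        have hslice : PySem.List.slice (p ++ '0' :: q) (some ((p.length : Int) + 1)) none = q := by
          have h2 : ((p.length : Int) + 1) = ((p.length + 1 : Nat) : Int) := by push_cast; ring
          rw [h2, PySem.List.slice_from_natCast]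
          simp
        rw [hslice, pvA_newStr_eq p q]
        have hstr : (p.map pvFlip ++ ['1']) ++ q = p.map pvFlip ++ '1' :: q := by simp
        rw [hstr, ih]
        have hones : pvB_ones (p ++ '0' :: q) + (pvB_ones (p.map pvFlip) + 1 - pvB_ones p)
            = pvB_ones (p.map pvFlip ++ '1' :: q) := by
          rw [pvB_ones_append, pvB_ones_append]
          simp [pvB_ones]; ring
        rw [hones]
        simp
      · rw [pvA_scan_none bs hz 0 0, pvB_find_none bs hz 0]
        simp [pv_main_sat rest bs hz]

-- ===== VERDICT (by name: the statement is the Claim_ definition above) =====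
theorem binaryStrings_spec : Claim_equal_binaryStrings := by
  intro s reqs _
  unfold Spec_binaryStrings binaryStrings binaryStrings_alt
  exact pv_main reqs s.toList
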